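-- pv_equiv track=rewrite | github.com/toypresent81/codetree | 251111/2개 이상의 알파벳/more-than-one-alphabet.py | two_more_alpha
-- ===== SOURCE A (Python) =====
-- def two_more_alpha(a):
--
--     is_two_more = False
--     for i in range(len(a)):
--         count = 0
--         for j in range(1, len(a)- 1):
--             if a[i] != a[j]:
--                 count += 1
--
--         if count >= 2:
--             is_two_more = True
--             break
--     return is_two_more
-- ===== SOURCE B (Python) =====
-- def two_more_alpha(a):
--     w = a[1:len(a) - 1]
--     m = len(w)
--     freq = {}
--     for c in w:
--         freq[c] = freq.get(c, 0) + 1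
--     return any(m - freq.get(c, 0) >= 2 for c in a)
-- ===== Notes on version B (the rewrite author's own statement) =====
-- stated objective: faster
-- what changed: Replaces the nested index loops (for each position, rescan the middle slice) by one pass that builds a frequency dict of the middle slice a[1:-1] and then checks len(slice) - freq[c] >= 2 once per character.
import Mathlib
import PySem

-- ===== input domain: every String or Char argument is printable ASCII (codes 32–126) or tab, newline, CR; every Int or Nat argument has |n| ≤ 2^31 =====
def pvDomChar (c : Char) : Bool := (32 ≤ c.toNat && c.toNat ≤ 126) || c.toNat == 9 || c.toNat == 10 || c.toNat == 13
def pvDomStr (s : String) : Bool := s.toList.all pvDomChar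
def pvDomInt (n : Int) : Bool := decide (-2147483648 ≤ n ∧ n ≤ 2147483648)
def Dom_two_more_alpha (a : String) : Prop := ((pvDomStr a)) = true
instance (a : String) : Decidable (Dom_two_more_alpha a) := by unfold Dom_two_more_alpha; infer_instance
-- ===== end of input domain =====

-- B replaces A's nested rescans (for each position, recount the middle slice) by one
-- frequency pass over the slice a[1:len(a)-1], then one check per character (objective: faster).

-- ===== PORT A =====
-- inner loop of A: count = number of j in range(1, len(a)-1) with a[i] != a[j]
def twoMoreAlphaCount (l : List Char) (i : Int) : Int :=
  (PySem.List.pyRange 1 ((l.length : Int) - 1)).foldl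
    (fun count j =>
      if PySem.List.pyGet? l i ≠ PySem.List.pyGet? l j then count + 1 else count) 0

-- outer loop of A with the early 'break' (returning true)
def twoMoreAlphaLoop (l : List Char) : List Int → Bool
  | [] => false
  | i :: rest => if twoMoreAlphaCount l i ≥ 2 then true else twoMoreAlphaLoop l rest

def two_more_alpha (a : String) : Bool :=
  twoMoreAlphaLoop a.toList (PySem.List.pyRange 0 (a.toList.length : Int))

-- ===== PORT B =====
def two_more_alpha_alt (a : String) : Bool :=
  let l := a.toList
  let w := PySem.List.slice l (some 1) (some ((l.length : Int) - 1))   -- a[1:len(a)-1]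
  let m : Int := (w.length : Int)
  let freq := w.foldl (fun d c => d.insert c (d.getD c 0 + 1)) PySem.Dict.empty
  l.any (fun c => decide (m - freq.getD c 0 ≥ 2))

-- ===== PRECONDITION & SPEC =====
def Spec_two_more_alpha (a : String) (out : Bool) : Prop := out = two_more_alpha_alt a
instance (a : String) (out : Bool) : Decidable (Spec_two_more_alpha a out) := by unfold Spec_two_more_alpha; infer_instance

-- ===== CLAIM (what is proved, stated in full; the proofs are below) =====
def Claim_equal_two_more_alpha : Prop := ∀ (a : String), Dom_two_more_alpha a → Spec_two_more_alpha a (two_more_alpha a)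

-- ===== LEMMAS AND PROOFS =====

-- the middle window a[1:len(a)-1] as drop/take
def pvWindow (l : List Char) : List Char := (l.drop 1).take (l.length - 2)

theorem pvGet_nat (l : List Char) (j : Nat) (h : j < l.length) :
    PySem.List.pyGet? l (j : Int) = some l[j] := by
  simp [PySem.List.pyGet?, PySem.List.pyIdx?, h]

theorem pvSlice_eq_window (l : List Char) :
    PySem.List.slice l (some 1) (some ((l.length : Int) - 1)) = pvWindow l := by
  cases l with
  | nil => rfl
  | cons x t =>
      have h : ((x :: t).length : Int) - 1 = ((t.length : Nat) : Int) := by simp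
      rw [h]
      have := PySem.List.slice_natCast (x :: t) 1 t.length
      simpa [pvWindow] using this

theorem pvWindow_eq_map (l : List Char) :
    pvWindow l = (List.range (l.length - 2)).map (fun k => l.getD (1 + k) 'x') := by
  apply List.ext_getElem
  · simp [pvWindow]; omega
  · intro k h1 h2
    simp only [pvWindow] at h1 ⊢
    simp at h1
    rw [List.getElem_take, List.getElem_drop, List.getElem_map, List.getElem_range,
      List.getD_eq_getElem?_getD, List.getElem?_eq_getElem (by omega : 1 + k < l.length)]
    simp [Nat.add_comm]

theorem pvCount_eq (l : List Char) (i : Nat) (h : i < l.length) :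
    twoMoreAlphaCount l (i : Int) =
      ((pvWindow l).countP (fun ch => !(ch == l[i])) : Int) := by
  unfold twoMoreAlphaCount
  rw [PySem.List.foldl_ite_add_one, PySem.List.pyRange_one]
  have hn : (((l.length : Int) - 1) - 1).toNat = l.length - 2 := by omega
  rw [hn, List.countP_map, pvWindow_eq_map, List.countP_map]
  rw [zero_add, Nat.cast_inj]
  apply List.countP_congr
  intro k hk
  simp only [List.mem_range] at hk
  have h1k : 1 + k < l.length := by omega
  have : (1 : Int) + (k : Int) = ((1 + k : Nat) : Int) := by push_cast; ring
  simp only [Function.comp, this, pvGet_nat l i h, pvGet_nat l (1+k) h1k,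
    List.getD_eq_getElem?_getD, List.getElem?_eq_getElem h1k]
  by_cases he : l[i] = l[1 + k]
  · simp [he]
  · simp [he, Ne.symm he]

theorem pvAny_range (l : List Char) (p : Char → Bool) :
    (List.range l.length).any (fun k => p (l.getD k 'x')) = l.any p := by
  rw [Bool.eq_iff_iff]
  simp only [List.any_eq_true, List.mem_range]
  constructor
  · rintro ⟨k, hk, hp⟩
    exact ⟨l[k], List.getElem_mem _,
      by simpa [List.getD_eq_getElem?_getD, List.getElem?_eq_getElem hk] using hp⟩
  · rintro ⟨c, hc, hp⟩
    obtain ⟨k, hk, rfl⟩ := List.mem_iff_getElem.mp hc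
    exact ⟨k, hk, by simpa [List.getD_eq_getElem?_getD, List.getElem?_eq_getElem hk] using hp⟩

theorem pvLoop_eq_any (l : List Char) (is : List Int) :
    twoMoreAlphaLoop l is = is.any (fun i => decide (twoMoreAlphaCount l i ≥ 2)) := by
  induction is with
  | nil => rfl
  | cons i rest ih =>
      simp only [twoMoreAlphaLoop, List.any_cons, ih]
      by_cases h : twoMoreAlphaCount l i ≥ 2 <;> simp [h]

theorem pvA_char (a : String) :
    two_more_alpha a =
      a.toList.any (fun c =>
        decide (((pvWindow a.toList).countP (fun ch => !(ch == c)) : Int) ≥ 2)) := by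
  unfold two_more_alpha
  rw [pvLoop_eq_any, PySem.List.pyRange_zero_natCast, List.any_map, ← pvAny_range]
  apply PySem.List.any_congr_mem
  intro k hk
  simp only [List.mem_range] at hk
  simp only [Function.comp, pvCount_eq a.toList k hk,
    List.getD_eq_getElem?_getD, List.getElem?_eq_getElem hk, Option.getD_some]

theorem pvB_char (a : String) :
    two_more_alpha_alt a =
      a.toList.any (fun c =>
        decide (((pvWindow a.toList).length : Int) - ((pvWindow a.toList).count c : Int) ≥ 2)) := by
  unfold two_more_alpha_alt
  simp only [pvSlice_eq_window, PySem.Dict.getD_foldl_insert_add_one, PySem.Dict.getD_empty,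
    zero_add]

theorem pvCountP_sub (w : List Char) (c : Char) :
    ((w.countP (fun ch => !(ch == c)) : Nat) : Int) = (w.length : Int) - (w.count c : Int) := by
  have h : w.count c + w.countP (fun x => !(x == c)) = w.length := by
    simpa [List.count] using (List.length_eq_countP_add_countP (p := (· == c)) (l := w)).symm
  omega

-- ===== VERDICT (by name: the statement is the Claim_ definition above) =====
theorem two_more_alpha_spec : Claim_equal_two_more_alpha := by
  intro a _
  unfold Spec_two_more_alpha
  rw [pvA_char, pvB_char]
  apply PySem.List.any_congr_mem
  intro c _
  rw [pvCountP_sub]
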